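-- pv_equiv track=rewrite | github.com/krorange/LING-L545 | 03_Tokenisation/maxmatch.py | MaxMatch
-- ===== SOURCE A (Python) =====
-- def MaxMatch(sentence, dictionary):
-- 	if sentence == [] or sentence == '':
-- 		return []
-- 	for i in range(len(sentence), 1, -1):
-- 		firstword = sentence[0:i]
-- 		remainder = sentence[i:]
-- 		if firstword in dictionary:
-- 			return [firstword] + MaxMatch(remainder, dictionary)
-- 	# if no word was found, so make a one-character word
-- 	firstword = sentence[0]
-- 	remainder = sentence[1:]
-- 	return [firstword] + MaxMatch(remainder, dictionary)
-- ===== SOURCE B (Python) =====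
-- def MaxMatch(sentence, dictionary):
--     # Iterative greedy longest-match; return value only (A is recursive).
--     words = {w for w in dictionary if len(w) >= 2}
--     tokens = []
--     i, n = 0, len(sentence)
--     while i < n:
--         k = max((len(w) for w in words if sentence.startswith(w, i)), default=1)
--         tokens.append(sentence[i:i+k])
--         i += k
--     return tokens
-- ===== Notes on version B (the rewrite author's own statement) =====
-- stated objective: faster
-- what changed: Replaces A's recursion that, at every position, rescans all remaining prefix lengths with a linear list membership test, by an iterative loop that pre-filters the dictionary once into a set of words of length >= 2 and at each position takes the longest set word that is a prefix of the remaining text.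
import Mathlib
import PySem

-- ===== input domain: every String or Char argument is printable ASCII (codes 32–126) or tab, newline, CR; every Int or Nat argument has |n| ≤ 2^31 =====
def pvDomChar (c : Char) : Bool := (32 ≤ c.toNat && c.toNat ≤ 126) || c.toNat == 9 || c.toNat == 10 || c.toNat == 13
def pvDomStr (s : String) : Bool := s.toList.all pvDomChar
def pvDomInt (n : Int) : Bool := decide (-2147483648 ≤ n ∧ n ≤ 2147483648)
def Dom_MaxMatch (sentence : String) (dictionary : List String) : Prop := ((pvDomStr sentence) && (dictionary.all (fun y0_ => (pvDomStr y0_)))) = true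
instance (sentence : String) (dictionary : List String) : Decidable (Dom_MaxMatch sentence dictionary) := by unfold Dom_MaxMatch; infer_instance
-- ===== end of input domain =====

-- B replaces A's recursion-with-descending-length-scan by an iterative loop that, at each
-- position, takes the longest dictionary word (pre-filtered once to words of length ≥ 2,
-- as a set) that is a prefix of the remaining text; return value only (no mutation in A).

-- ===== PORT A =====
-- A's for-loop 'for i in range(len(sentence), 1, -1): … return …' with its early return:
-- scan j = len, len-1, …, 2 and return the first j with sentence[0:j] in dictionary.
def pvScanA (s : List Char) (dict : List String) : Nat → Option Nat
  | j + 2 =>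
    if dict.contains (String.ofList (s.take (j + 2))) then some (j + 2)
    else pvScanA s dict (j + 1)
  | _ => none

-- A's recursion, with fuel = length of the string (each call consumes ≥ 1 character).
def pvGoA (dict : List String) : Nat → List Char → List String
  | 0, _ => []
  | fuel + 1, s =>
    if s = [] then []   -- 'sentence == [] or sentence == ""' (the first test is always false on str)
    else
      match pvScanA s dict s.length with
      | some i => String.ofList (s.take i) :: pvGoA dict fuel (s.drop i)
      | none => String.ofList (s.take 1) :: pvGoA dict fuel (s.drop 1)  -- sentence[0], sentence[1:]

def MaxMatch (sentence : String) (dictionary : List String) : List String :=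
  pvGoA dictionary sentence.toList.length sentence.toList

-- ===== PORT B =====
-- k = max((len(w) for w in words if sentence.startswith(w, i)), default=1), as a fold over the set.
def pvBestK (rem : List Char) (ws : List String) : Nat :=
  ws.foldl (fun k w => if w.toList.isPrefixOf rem then max k w.toList.length else k) 1

-- the while loop over positions; rem = sentence[i:], fuel = length (k ≥ 1 each step).
def pvGoB (ws : List String) : Nat → List Char → List String
  | 0, _ => []
  | fuel + 1, rem =>
    if rem = [] then []
    else
      let k := pvBestK rem ws
      String.ofList (rem.take k) :: pvGoB ws fuel (rem.drop k)

def MaxMatch_alt (sentence : String) (dictionary : List String) : List String :=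
  let ws : PySem.Set String :=
    PySem.Set.ofList (dictionary.filter (fun w => 2 ≤ PySem.Str.len w))
  pvGoB ws sentence.toList.length sentence.toList

-- ===== PRECONDITION & SPEC =====
def Spec_MaxMatch (sentence : String) (dictionary : List String) (out : List String) : Prop := out = MaxMatch_alt sentence dictionary
instance (sentence : String) (dictionary : List String) (out : List String) : Decidable (Spec_MaxMatch sentence dictionary out) := by unfold Spec_MaxMatch; infer_instance

-- ===== CLAIM (what is proved, stated in full; the proofs are below) =====
def Claim_equal_MaxMatch : Prop := ∀ (sentence : String) (dictionary : List String), Dom_MaxMatch sentence dictionary → Spec_MaxMatch sentence dictionary (MaxMatch sentence dictionary)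

-- ===== LEMMAS AND PROOFS =====

-- 'Qd s dict i': A's test fires for prefix length i.
def pvQd (s : List Char) (dict : List String) (i : Nat) : Prop :=
  dict.contains (String.ofList (s.take i)) = true

-- 'Q rem ws i': some word of the (filtered) set of length i is a prefix of rem.
def pvQ (rem : List Char) (ws : List String) (i : Nat) : Prop :=
  ∃ w ∈ ws, w.toList <+: rem ∧ w.toList.length = i

-- pvScanA returns the LARGEST j' ∈ [2, j] with pvQd, if any.
theorem pvScanA_some (s : List Char) (dict : List String) :
    ∀ j i, pvScanA s dict j = some i →
      2 ≤ i ∧ i ≤ j ∧ pvQd s dict i ∧ ∀ i', i < i' → i' ≤ j → ¬ pvQd s dict i' := by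
  intro j
  induction j using Nat.strong_induction_on with
  | _ j ih =>
    match j with
    | 0 => intro i h; simp [pvScanA] at h
    | 1 => intro i h; simp [pvScanA] at h
    | m + 2 =>
      intro i h
      rw [pvScanA] at h
      by_cases hc : dict.contains (String.ofList (s.take (m + 2))) = true
      · rw [if_pos hc] at h
        obtain rfl : m + 2 = i := by injection h
        exact ⟨by omega, le_refl _, hc, fun i' h1 h2 => (by omega : False).elim⟩
      · rw [if_neg hc] at h
        obtain ⟨h2, hle, hq, hmax⟩ := ih (m + 1) (by omega) i h
        refine ⟨h2, by omega, hq, fun i' h1 h2' => ?_⟩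
        by_cases he : i' = m + 2
        · subst he; exact fun hq' => hc hq'
        · exact hmax i' h1 (by omega)

theorem pvScanA_none (s : List Char) (dict : List String) :
    ∀ j, pvScanA s dict j = none → ∀ i, 2 ≤ i → i ≤ j → ¬ pvQd s dict i := by
  intro j
  induction j using Nat.strong_induction_on with
  | _ j ih =>
    match j with
    | 0 => intro _ i h1 h2; omega
    | 1 => intro _ i h1 h2; omega
    | m + 2 =>
      intro h i h1 h2
      rw [pvScanA] at h
      by_cases hc : dict.contains (String.ofList (s.take (m + 2))) = true
      · rw [if_pos hc] at h; exact absurd h (by simp)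
      · rw [if_neg hc] at h
        by_cases he : i = m + 2
        · subst he; exact fun hq => hc hq
        · exact ih (m + 1) (by omega) h i h1 (by omega)

-- the fold computing pvBestK: lower bound by its accumulator …
theorem pvFold_ge (rem : List Char) :
    ∀ (ws : List String) (a : Nat),
      a ≤ ws.foldl (fun k w => if w.toList.isPrefixOf rem then max k w.toList.length else k) a := by
  intro ws
  induction ws with
  | nil => intro a; simp
  | cons w ws ih =>
    intro a
    simp only [List.foldl_cons]
    split
    · exact le_trans (le_max_left _ _) (ih _)
    · exact ih a

-- … upper-bounds every matching word's length …
theorem pvFold_ub (rem : List Char) :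
    ∀ (ws : List String) (a : Nat) (w : String), w ∈ ws → w.toList <+: rem →
      w.toList.length ≤ ws.foldl (fun k w => if w.toList.isPrefixOf rem then max k w.toList.length else k) a := by
  intro ws
  induction ws with
  | nil => intro a w h; simp at h
  | cons v ws ih =>
    intro a w hmem hpre
    simp only [List.foldl_cons]
    rcases List.mem_cons.mp hmem with rfl | hmem'
    · rw [if_pos (List.isPrefixOf_iff_prefix.mpr hpre)]
      exact le_trans (le_max_right _ _) (pvFold_ge rem ws _)
    · exact ih _ w hmem' hpre

-- … and is either the accumulator or a matching word's length.
theorem pvFold_cases (rem : List Char) :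
    ∀ (ws : List String) (a : Nat),
      ws.foldl (fun k w => if w.toList.isPrefixOf rem then max k w.toList.length else k) a = a ∨
      pvQ rem ws (ws.foldl (fun k w => if w.toList.isPrefixOf rem then max k w.toList.length else k) a) := by
  intro ws
  induction ws with
  | nil => intro a; left; simp
  | cons v ws ih =>
    intro a
    simp only [List.foldl_cons]
    by_cases hp : v.toList.isPrefixOf rem = true
    · rw [if_pos hp]
      rcases ih (max a v.toList.length) with h | h
      · rcases max_choice a v.toList.length with hm | hm
        · left; rw [h, hm]
        · right
          exact ⟨v, List.mem_cons_self .., List.isPrefixOf_iff_prefix.mp hp, by rw [h, hm]⟩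
      · right
        obtain ⟨w, hw, hpre, hlen⟩ := h
        exact ⟨w, List.mem_cons_of_mem _ hw, hpre, hlen⟩
    · rw [if_neg hp]
      rcases ih a with h | h
      · left; exact h
      · right
        obtain ⟨w, hw, hpre, hlen⟩ := h
        exact ⟨w, List.mem_cons_of_mem _ hw, hpre, hlen⟩

-- the filtered word set: pvQ there gives 2 ≤ i ≤ |rem| and pvQd, and conversely.
theorem pvQ_iff (rem : List Char) (dict : List String) (i : Nat) :
    pvQ rem (PySem.Set.ofList (dict.filter (fun w => 2 ≤ PySem.Str.len w))) i ↔
      (2 ≤ i ∧ i ≤ rem.length ∧ pvQd rem dict i) := by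
  constructor
  · rintro ⟨w, hw, hpre, hlen⟩
    rw [PySem.Set.mem_ofList, List.mem_filter] at hw
    obtain ⟨hwd, hwl⟩ := hw
    have hlen2 : 2 ≤ w.toList.length := by
      have := of_decide_eq_true hwl
      simpa [PySem.Str.len_eq, PySem.Chars.len_eq] using this
    have hle : w.toList.length ≤ rem.length := hpre.length_le
    refine ⟨by omega, by omega, ?_⟩
    have : w.toList = rem.take i := by
      rw [List.prefix_iff_eq_take.mp hpre, hlen]
    unfold pvQd
    rw [← this, String.ofList_toList]
    exact List.contains_iff_mem.mpr hwd
  · rintro ⟨h2, hle, hq⟩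
    refine ⟨String.ofList (rem.take i), ?_, ?_, ?_⟩
    · rw [PySem.Set.mem_ofList, List.mem_filter]
      refine ⟨List.contains_iff_mem.mp hq, ?_⟩
      have : (String.ofList (rem.take i)).toList.length = i := by
        rw [String.toList_ofList, List.length_take]; omega
      simp only [PySem.Str.len_eq, this]
      exact decide_eq_true (by exact_mod_cast h2)
    · rw [String.toList_ofList]; exact List.take_prefix i rem
    · rw [String.toList_ofList, List.length_take]; omega

-- per step: A's chosen token length equals B's.
theorem pvStep_eq (s : List Char) (dict : List String) (_hs : s ≠ []) :
    (match pvScanA s dict s.length with | some i => i | none => 1) =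
      pvBestK s (PySem.Set.ofList (dict.filter (fun w => 2 ≤ PySem.Str.len w))) := by
  set ws := PySem.Set.ofList (dict.filter (fun w => 2 ≤ PySem.Str.len w)) with hws
  set K := pvBestK s ws with hK
  have hKcases := pvFold_cases s ws 1
  rw [← pvBestK, ← hK] at hKcases
  cases hscan : pvScanA s dict s.length with
  | some i =>
    obtain ⟨h2, hle, hq, hmax⟩ := pvScanA_some s dict s.length i hscan
    have hQi : pvQ s ws i := (pvQ_iff s dict i).mpr ⟨h2, hle, hq⟩
    obtain ⟨w, hw, hpre, hlen⟩ := hQi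
    have hiK : i ≤ K := by
      rw [hK]; unfold pvBestK; rw [← hlen]
      exact pvFold_ub s ws 1 w hw hpre
    rcases hKcases with h1 | hQK
    · omega
    · obtain ⟨hK2, hKle, hKq⟩ := (pvQ_iff s dict K).mp hQK
      by_cases heq : K = i
      · simpa using heq.symm
      · exact absurd hKq (hmax K (by omega) hKle)
  | none =>
    have hnone := pvScanA_none s dict s.length hscan
    rcases hKcases with h1 | hQK
    · simpa using h1.symm
    · obtain ⟨hK2, hKle, hKq⟩ := (pvQ_iff s dict K).mp hQK
      exact absurd hKq (hnone K hK2 hKle)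

-- the two loops agree for equal fuel.
theorem pvGo_eq (dict : List String) :
    ∀ (fuel : Nat) (s : List Char),
      pvGoA dict fuel s =
        pvGoB (PySem.Set.ofList (dict.filter (fun w => 2 ≤ PySem.Str.len w))) fuel s := by
  intro fuel
  induction fuel with
  | zero => intro s; rfl
  | succ n ih =>
    intro s
    by_cases hs : s = []
    · subst hs; rfl
    · have hstep := pvStep_eq s dict hs
      rw [pvGoA, pvGoB, if_neg hs, if_neg hs]
      cases hscan : pvScanA s dict s.length with
      | some i =>
        rw [hscan] at hstep
        simp only at hstep
        rw [← hstep]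
        exact congrArg _ (ih (s.drop i))
      | none =>
        rw [hscan] at hstep
        simp only at hstep
        rw [← hstep]
        exact congrArg _ (ih (s.drop 1))

-- ===== VERDICT (by name: the statement is the Claim_ definition above) =====
theorem MaxMatch_spec : Claim_equal_MaxMatch := by
  intro sentence dictionary _
  unfold Spec_MaxMatch MaxMatch MaxMatch_alt
  exact pvGo_eq dictionary sentence.toList.length sentence.toList
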